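-- pv_equiv track=rewrite | github.com/Carter-75/Paper-Trading | utils/helpers.py | snap_interval_to_supported_seconds
-- ===== SOURCE A (Python) =====
-- def snap_interval_to_supported_seconds(interval: int) -> int:
--     """Snap arbitrary seconds to nearest supported Alpaca interval.
--     Supported: 1m (60), 5m (300), 15m (900), 1h (3600), 1d (86400)
--     """
--     supported = [60, 300, 900, 3600, 86400]
--
--     closest = supported[0]
--     min_diff = abs(interval - closest)
--
--     for s in supported:
--         diff = abs(interval - s)
--         if diff < min_diff:
--             min_diff = diff
--             closest = s
--
--     return closest
-- ===== SOURCE B (Python) =====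
-- def snap_interval_to_supported_seconds(interval: int) -> int:
--     """Snap arbitrary seconds to nearest supported Alpaca interval.
--     Supported: 1m (60), 5m (300), 15m (900), 1h (3600), 1d (86400)
--     """
--     supported = [60, 300, 900, 3600, 86400]
--     # insertion index: number of supported values strictly below interval
--     pos = sum(1 for s in supported if s < interval)
--     if pos == 0:
--         return supported[0]
--     if pos == len(supported):
--         return supported[-1]
--     lo = supported[pos - 1]
--     hi = supported[pos]
--     return lo if interval - lo <= hi - interval else hi
-- ===== Notes on version B (the rewrite author's own statement) =====
-- stated objective: idiomatic
-- what changed: Replaced the running-minimum scan over absolute differences with an insertion-index (bisect-style) lookup into the sorted table followed by a single two-neighbor distance comparison with endpoint clamping.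
import Mathlib
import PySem

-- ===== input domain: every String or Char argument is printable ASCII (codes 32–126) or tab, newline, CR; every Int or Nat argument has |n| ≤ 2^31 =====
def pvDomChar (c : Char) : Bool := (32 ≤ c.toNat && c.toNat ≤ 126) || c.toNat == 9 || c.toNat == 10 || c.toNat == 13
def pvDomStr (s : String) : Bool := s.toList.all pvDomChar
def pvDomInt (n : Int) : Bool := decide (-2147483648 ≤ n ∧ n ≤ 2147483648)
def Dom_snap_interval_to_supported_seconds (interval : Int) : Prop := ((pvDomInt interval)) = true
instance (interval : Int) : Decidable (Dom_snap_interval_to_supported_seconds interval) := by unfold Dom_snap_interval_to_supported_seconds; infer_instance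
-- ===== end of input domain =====

-- B replaces the running-minimum scan with an insertion-index lookup and a two-neighbor
-- comparison (idiomatic, same cost); return values agree everywhere.

-- ===== PORT A =====
-- fold carries (closest, min_diff) exactly as A's loop does
def snap_interval_to_supported_seconds (interval : Int) : Int :=
  let supported : List Int := [60, 300, 900, 3600, 86400]
  let closest := supported[0]!
  let min_diff := |interval - closest|
  let r := supported.foldl (fun (st : Int × Int) s =>
    let diff := |interval - s|
    if diff < st.2 then (s, diff) else st) (closest, min_diff)
  r.1

-- ===== PORT B =====
def snap_interval_to_supported_seconds_alt (interval : Int) : Int :=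
  let supported : List Int := [60, 300, 900, 3600, 86400]
  -- insertion index: number of supported values strictly below interval
  let pos := (supported.filter (fun s => s < interval)).length
  if pos = 0 then supported[0]!
  else if pos = supported.length then supported.getLast!
  else
    let lo := supported[pos - 1]!
    let hi := supported[pos]!
    if interval - lo ≤ hi - interval then lo else hi

-- ===== PRECONDITION & SPEC =====
def Spec_snap_interval_to_supported_seconds (interval : Int) (out : Int) : Prop := out = snap_interval_to_supported_seconds_alt interval
instance (interval : Int) (out : Int) : Decidable (Spec_snap_interval_to_supported_seconds interval out) := by unfold Spec_snap_interval_to_supported_seconds; infer_instance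

-- ===== CLAIM (what is proved, stated in full; the proofs are below) =====
def Claim_equal_snap_interval_to_supported_seconds : Prop := ∀ (interval : Int), Dom_snap_interval_to_supported_seconds interval → Spec_snap_interval_to_supported_seconds interval (snap_interval_to_supported_seconds interval)

-- ===== LEMMAS AND PROOFS =====

-- the common closed-form value, used only by the proofs
def pvSnapVal (i : Int) : Int :=
  if i ≤ 180 then 60 else if i ≤ 600 then 300 else if i ≤ 2250 then 900
  else if i ≤ 45000 then 3600 else 86400

set_option maxHeartbeats 1000000 in
theorem pvB_eq (i : Int) : snap_interval_to_supported_seconds_alt i = pvSnapVal i := by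
  unfold snap_interval_to_supported_seconds_alt pvSnapVal
  by_cases c1 : (60:Int) < i <;> by_cases c2 : (300:Int) < i <;>
  by_cases c3 : (900:Int) < i <;> by_cases c4 : (3600:Int) < i <;>
  by_cases c5 : (86400:Int) < i <;>
  simp only [List.filter, c1, c2, c3, c4, c5, decide_true, decide_false,
    List.length, List.getLast!, List.getElem!_eq_getElem?_getD, List.getElem?_cons,
    if_true] <;>
  norm_num <;> split_ifs <;> omega

set_option maxHeartbeats 1000000 in
theorem pvA_eq (i : Int) : snap_interval_to_supported_seconds i = pvSnapVal i := by
  unfold snap_interval_to_supported_seconds pvSnapVal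
  simp only [List.foldl, List.getElem!_eq_getElem?_getD, List.getElem?_cons,
    abs_eq_max_neg]
  norm_num
  split_ifs <;> omega

-- ===== VERDICT (by name: the statement is the Claim_ definition above) =====
theorem snap_interval_to_supported_seconds_spec : Claim_equal_snap_interval_to_supported_seconds := by
  intro interval _
  unfold Spec_snap_interval_to_supported_seconds
  rw [pvA_eq, pvB_eq]
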